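-- pv_equiv track=rewrite | github.com/Lucas-Fernandes-Martins/CurriculumGEPA | gepa_ifbench.py | _parse_instruction_scores
-- ===== SOURCE A (Python) =====
-- def _parse_instruction_scores(raw_feedback, instruction_ids):
--     """Parse raw feedback to determine which instructions passed."""
--     scores = {}
--
--     for instruction_id in instruction_ids:
--         # Simple heuristic: if instruction_id appears with "1.0", it passed
--         if instruction_id in raw_feedback:
--             # Look for the score after the instruction_id
--             lines = raw_feedback.split('\n')
--             for line in lines:
--                 if instruction_id in line and '1.0' in line:
--                     scores[instruction_id] = True
--                     break
--                 elif instruction_id in line and '0.0' in line: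
--                     scores[instruction_id] = False
--                     break
--
--             # If not found in lines, default to False
--             if instruction_id not in scores:
--                 scores[instruction_id] = False
--         else:
--             scores[instruction_id] = False
--
--     return scores
-- ===== SOURCE B (Python) =====
-- def _parse_instruction_scores(raw_feedback, instruction_ids):
--     """Single pass over the feedback lines: every id starts False and pending;
--     each line resolves all still-pending ids it contains (True iff '1.0' in line),
--     provided the line carries a score at all."""
--     lines = raw_feedback.split('\n')
--     scores = {iid: False for iid in instruction_ids}
--     pending = list(scores)
--     for line in lines:
--         if not pending:
--             break
--         has1 = '1.0' in line
--         if not (has1 or '0.0' in line):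
--             continue
--         still = []
--         for iid in pending:
--             if iid in line:
--                 if has1:
--                     scores[iid] = True
--             else:
--                 still.append(iid)
--         pending = still
--     return scores
-- ===== Notes on version B (the rewrite author's own statement) =====
-- stated objective: faster
-- what changed: A re-splits the whole feedback and rescans every line separately for each instruction id; B splits once, initialises every id to False, and makes a single line-major pass that resolves each still-pending id at its first score-carrying line containing it and stops once nothing is pending.
import Mathlib
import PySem

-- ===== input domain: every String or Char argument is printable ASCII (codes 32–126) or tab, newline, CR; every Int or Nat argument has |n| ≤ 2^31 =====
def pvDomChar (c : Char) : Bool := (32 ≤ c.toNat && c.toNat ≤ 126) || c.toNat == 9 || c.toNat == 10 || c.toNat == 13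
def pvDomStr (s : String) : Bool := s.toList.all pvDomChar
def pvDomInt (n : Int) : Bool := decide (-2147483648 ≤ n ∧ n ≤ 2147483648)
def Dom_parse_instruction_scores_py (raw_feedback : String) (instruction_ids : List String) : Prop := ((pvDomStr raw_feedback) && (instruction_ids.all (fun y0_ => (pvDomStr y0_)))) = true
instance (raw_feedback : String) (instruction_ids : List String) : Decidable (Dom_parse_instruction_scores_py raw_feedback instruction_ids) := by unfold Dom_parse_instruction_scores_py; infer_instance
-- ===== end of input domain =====

-- B splits the feedback once and resolves all ids in one line-major pass with a pending list, instead of A's per-id re-split and rescan (measured faster).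

-- ===== PORT A =====
-- A's inner `for line in lines: … break` loop: returns the dict after the loop
def pvAScanLines (scores : PySem.Dict String Bool) (instruction_id : String) :
    List String → PySem.Dict String Bool
  | [] => scores
  | line :: rest =>
    if PySem.Str.isIn instruction_id line && PySem.Str.isIn "1.0" line then
      scores.insert instruction_id true
    else if PySem.Str.isIn instruction_id line && PySem.Str.isIn "0.0" line then
      scores.insert instruction_id false
    else pvAScanLines scores instruction_id rest

def parse_instruction_scores_py (raw_feedback : String) (instruction_ids : List String) : List (String × Bool) :=
  (instruction_ids.foldl (fun (scores : PySem.Dict String Bool) instruction_id =>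
      if PySem.Str.isIn instruction_id raw_feedback then
        let lines := (PySem.Str.split? raw_feedback "\n").getD []
        let scores1 := pvAScanLines scores instruction_id lines
        if scores1.contains instruction_id then scores1 else scores1.insert instruction_id false
      else scores.insert instruction_id false)
    PySem.Dict.empty).items

-- ===== PORT B =====
-- body of B's inner `for iid in pending` loop: state = (scores, still)
def pvBResolveLine (line : String) (has1 : Bool)
    (sq : PySem.Dict String Bool × List String) (iid : String) :
    PySem.Dict String Bool × List String :=
  if PySem.Str.isIn iid line then
    (if has1 then (sq.1.insert iid true, sq.2) else sq)
  else (sq.1, sq.2 ++ [iid])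

-- body of B's `for line in lines` loop; `if not pending: break` = the state never changes again
def pvBLine (sp : PySem.Dict String Bool × List String) (line : String) :
    PySem.Dict String Bool × List String :=
  if sp.2.isEmpty then sp
  else
    let has1 := PySem.Str.isIn "1.0" line
    if !(has1 || PySem.Str.isIn "0.0" line) then sp
    else sp.2.foldl (pvBResolveLine line has1) (sp.1, [])

def parse_instruction_scores_py_alt (raw_feedback : String) (instruction_ids : List String) : List (String × Bool) :=
  let lines := (PySem.Str.split? raw_feedback "\n").getD []
  let scores := instruction_ids.foldl
    (fun (d : PySem.Dict String Bool) iid => d.insert iid false) PySem.Dict.empty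
  let pending := scores.keys
  (lines.foldl pvBLine (scores, pending)).1.items

-- ===== PRECONDITION & SPEC =====
def Spec_parse_instruction_scores_py (raw_feedback : String) (instruction_ids : List String) (out : List (String × Bool)) : Prop := out = parse_instruction_scores_py_alt raw_feedback instruction_ids
instance (raw_feedback : String) (instruction_ids : List String) (out : List (String × Bool)) : Decidable (Spec_parse_instruction_scores_py raw_feedback instruction_ids out) := by unfold Spec_parse_instruction_scores_py; infer_instance

-- ===== CLAIM (what is proved, stated in full; the proofs are below) =====
def Claim_equal_parse_instruction_scores_py : Prop := ∀ (raw_feedback : String) (instruction_ids : List String), Dom_parse_instruction_scores_py raw_feedback instruction_ids → Spec_parse_instruction_scores_py raw_feedback instruction_ids (parse_instruction_scores_py raw_feedback instruction_ids)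

-- ===== LEMMAS AND PROOFS =====

-- the Boolean a given id resolves to: first line containing it together with a score
def pvFirst (id : String) : List String → Option Bool
  | [] => none
  | line :: rest =>
    if PySem.Str.isIn id line && PySem.Str.isIn "1.0" line then some true
    else if PySem.Str.isIn id line && PySem.Str.isIn "0.0" line then some false
    else pvFirst id rest

-- the value A ends up storing for id
def pvVal (raw : String) (lines : List String) (id : String) : Bool :=
  if PySem.Str.isIn id raw then (pvFirst id lines).getD false else false

-- the value B ends up storing for id
def pvValP (lines : List String) (id : String) : Bool := (pvFirst id lines).getD false

-- dict whose keys are K (in order) and whose value at k is f k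
def pvD (K : List String) (f : String → Bool) : PySem.Dict String Bool :=
  ⟨K.map fun k => (k, f k)⟩

theorem pvAScanLines_eq (d : PySem.Dict String Bool) (id : String) (ls : List String) :
    pvAScanLines d id ls = match pvFirst id ls with
      | some b => d.insert id b
      | none => d := by
  induction ls with
  | nil => simp [pvAScanLines, pvFirst]
  | cons line rest ih =>
    simp only [pvAScanLines, pvFirst]
    split_ifs <;> simp [ih]

theorem pvFirst_append (id : String) (pre suf : List String) :
    pvFirst id (pre ++ suf) = (pvFirst id pre).or (pvFirst id suf) := by
  induction pre with
  | nil => simp [pvFirst]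
  | cons line rest ih =>
    simp only [List.cons_append, pvFirst]
    split_ifs <;> simp [ih]

theorem pv_go_infix (sep : List Char) (s0 : List Char) :
    ∀ (fuel : Nat) (l cur : List Char) (acc : List (List Char)),
      (∀ a ∈ acc, a <:+: s0) → (cur.reverse ++ l) <:+: s0 →
      ∀ p ∈ PySem.Chars.splitOn.go sep fuel l cur acc, p <:+: s0 := by
  intro fuel
  induction fuel with
  | zero =>
    intro l cur acc hacc hcl p hp
    simp only [PySem.Chars.splitOn.go] at hp
    simp only [List.mem_reverse, List.mem_cons] at hp
    rcases hp with h | h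
    · exact h ▸ hcl
    · exact hacc _ h
  | succ fuel ih =>
    intro l cur acc hacc hcl p hp
    cases l with
    | nil =>
      simp only [PySem.Chars.splitOn.go] at hp
      simp only [List.mem_reverse, List.mem_cons] at hp
      rcases hp with h | h
      · subst h; simpa using hcl
      · exact hacc _ h
    | cons c rest =>
      simp only [PySem.Chars.splitOn.go] at hp
      by_cases hpre : sep.isPrefixOf (c :: rest) = true
      · rw [if_pos hpre] at hp
        refine ih _ _ _ ?_ ?_ p hp
        · intro a ha
          rcases List.mem_cons.mp ha with h | h
          · subst h
            exact ((List.prefix_append _ _).isInfix).trans hcl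
          · exact hacc _ h
        · simp only [List.reverse_nil, List.nil_append]
          exact ((List.drop_suffix _ _).isInfix.trans
            ((List.suffix_append _ _).isInfix.trans hcl))
      · rw [if_neg hpre] at hp
        refine ih _ _ _ hacc ?_ p hp
        simpa [List.append_assoc] using hcl

theorem pv_splitOn_infix {s sep p : List Char}
    (hp : p ∈ PySem.Chars.splitOn s sep) : p <:+: s := by
  exact pv_go_infix sep s (s.length + 1) s [] [] (by simp) (by simp) p
    (by simpa [PySem.Chars.splitOn] using hp)

theorem pv_line_not_isIn {raw id line : String}
    (hline : line ∈ (PySem.Str.split? raw "\n").getD [])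
    (hid : PySem.Str.isIn id raw = false) : PySem.Str.isIn id line = false := by
  simp only [PySem.Str.split?, PySem.Chars.split?] at hline
  simp only [show ("\n" : String).toList = ['\n'] from rfl] at hline
  simp only [List.isEmpty_cons, if_false, Bool.false_eq_true, Option.map_some,
    Option.getD_some] at hline
  rcases List.mem_map.mp hline with ⟨q, hq, rfl⟩
  have hinf : q <:+: raw.toList := pv_splitOn_infix hq
  rw [PySem.Str.isIn_eq] at hid ⊢
  rw [String.toList_ofList]
  rw [PySem.Chars.isIn_eq_false_iff] at hid ⊢
  exact fun h => hid (h.trans hinf)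

theorem pvFirst_none_of_all (id : String) :
    ∀ ls : List String, (∀ l ∈ ls, PySem.Str.isIn id l = false) → pvFirst id ls = none := by
  intro ls
  induction ls with
  | nil => intro _; rfl
  | cons l rest ih =>
    intro h
    have h0 := h l (List.mem_cons_self)
    simp only [pvFirst, h0, Bool.false_and]
    exact ih fun x hx => h x (List.mem_cons_of_mem _ hx)

theorem pvVal_eq_pvValP (raw : String) (k : String) :
    pvVal raw ((PySem.Str.split? raw "\n").getD []) k
      = pvValP ((PySem.Str.split? raw "\n").getD []) k := by
  unfold pvVal pvValP
  by_cases hin : PySem.Str.isIn k raw = true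
  · rw [if_pos hin]
  · have hin' : PySem.Str.isIn k raw = false := by simpa using hin
    rw [if_neg hin]
    rw [pvFirst_none_of_all k _ (fun l hl => pv_line_not_isIn hl hin')]
    rfl

theorem pvD_congr {K : List String} {f g : String → Bool}
    (h : ∀ k ∈ K, f k = g k) : pvD K f = pvD K g := by
  unfold pvD
  exact congrArg _ (List.map_congr_left fun a ha => by rw [h a ha])

theorem contains_pvD (K : List String) (f : String → Bool) (k : String) :
    (pvD K f).contains k = K.contains k := by
  simp [pvD, PySem.Dict.contains, List.any_map, Function.comp_def, List.any_beq']

theorem keys_pvD (K : List String) (f : String → Bool) : (pvD K f).keys = K := by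
  simp [pvD, PySem.Dict.keys, List.map_map, Function.comp_def]

theorem insert_pvD_mem {K : List String} {k : String} (f : String → Bool) (b : Bool)
    (h : k ∈ K) :
    (pvD K f).insert k b = pvD K (fun k' => if k' = k then b else f k') := by
  have hc : (pvD K f).contains k = true := by
    rw [contains_pvD]; exact List.elem_eq_true_of_mem h
  simp only [PySem.Dict.insert, hc, if_pos]
  unfold pvD
  congr 1
  rw [List.map_map]
  apply List.map_congr_left
  intro a _
  by_cases hak : a = k
  · subst hak; simp
  · simp [Function.comp, hak, beq_iff_eq]

theorem insert_pvD_self {K : List String} {k : String} (f : String → Bool) (h : k ∈ K) :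
    (pvD K f).insert k (f k) = pvD K f := by
  rw [insert_pvD_mem f (f k) h]
  apply pvD_congr
  intro a _
  by_cases hak : a = k
  · subst hak; simp
  · simp [hak]

theorem insert_pvD_append {K : List String} {k : String} (f : String → Bool) (h : k ∉ K) :
    (pvD K f).insert k (f k) = pvD (K ++ [k]) f := by
  have hc : (pvD K f).contains k = false := by
    rw [contains_pvD]
    simpa using h
  simp only [PySem.Dict.insert, hc, Bool.false_eq_true]
  simp [pvD, List.map_append]

theorem insert_pvD_val {K : List String} (f : String → Bool) (k : String) :
    (pvD K f).insert k (f k) = pvD (PySem.Set.add K k) f := by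
  by_cases h : k ∈ K
  · rw [insert_pvD_self f h]
    have : PySem.Set.add K k = K := by
      simp [PySem.Set.add, PySem.Set.contains, h]
    rw [this]
  · rw [insert_pvD_append f h]
    have : PySem.Set.add K k = K ++ [k] := by
      simp only [PySem.Set.add, PySem.Set.contains]
      rw [if_neg (by simpa using h)]
    rw [this]

-- ===== A-side characterisation =====

theorem A_step (raw : String) (K : List String) (id : String) :
    (if PySem.Str.isIn id raw then
        let lines := (PySem.Str.split? raw "\n").getD []
        let scores1 := pvAScanLines (pvD K (pvVal raw ((PySem.Str.split? raw "\n").getD []))) id lines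
        if scores1.contains id then scores1 else scores1.insert id false
      else (pvD K (pvVal raw ((PySem.Str.split? raw "\n").getD []))).insert id false)
    = pvD (PySem.Set.add K id) (pvVal raw ((PySem.Str.split? raw "\n").getD [])) := by
  set L := (PySem.Str.split? raw "\n").getD [] with hL
  set f := pvVal raw L with hf
  by_cases hin : PySem.Str.isIn id raw = true
  · rw [if_pos hin]
    cases hfst : pvFirst id L with
    | none =>
      have hval : f id = false := by
        rw [hf]; unfold pvVal; rw [if_pos hin, hfst]; rfl
      have hscan : pvAScanLines (pvD K f) id L = pvD K f := by
        simp [pvAScanLines_eq, hfst]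
      simp only [hscan]
      by_cases hk : id ∈ K
      · rw [if_pos (by rw [contains_pvD]; exact List.elem_eq_true_of_mem hk)]
        have : PySem.Set.add K id = K := by
          simp [PySem.Set.add, PySem.Set.contains, hk]
        rw [this]
      · rw [if_neg (by rw [contains_pvD]; simpa using hk)]
        rw [← hval, insert_pvD_val]
    | some b =>
      have hval : f id = b := by
        rw [hf]; unfold pvVal; rw [if_pos hin, hfst]; rfl
      have hscan : pvAScanLines (pvD K f) id L = (pvD K f).insert id b := by
        simp [pvAScanLines_eq, hfst]
      simp only [hscan]
      rw [← hval, insert_pvD_val]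
      rw [if_pos]
      rw [contains_pvD]
      apply List.elem_eq_true_of_mem
      by_cases hk : id ∈ K <;> simp [PySem.Set.add, PySem.Set.contains, hk]
  · rw [if_neg hin]
    have hval : f id = false := by
      rw [hf]; unfold pvVal; rw [if_neg hin]
    rw [← hval, insert_pvD_val]

theorem A_fold (raw : String) (ids : List String) :
    ∀ K : List String,
    ids.foldl (fun (scores : PySem.Dict String Bool) instruction_id =>
      if PySem.Str.isIn instruction_id raw then
        let lines := (PySem.Str.split? raw "\n").getD []
        let scores1 := pvAScanLines scores instruction_id lines
        if scores1.contains instruction_id then scores1 else scores1.insert instruction_id false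
      else scores.insert instruction_id false)
      (pvD K (pvVal raw ((PySem.Str.split? raw "\n").getD [])))
    = pvD (PySem.Set.update K ids) (pvVal raw ((PySem.Str.split? raw "\n").getD [])) := by
  induction ids with
  | nil => intro K; simp [PySem.Set.update]
  | cons id rest ih =>
    intro K
    rw [List.foldl_cons]
    rw [show PySem.Set.update K (id :: rest) = PySem.Set.update (PySem.Set.add K id) rest by
      simp [PySem.Set.update]]
    rw [← ih (PySem.Set.add K id)]
    congr 1
    exact A_step raw K id

-- ===== B-side characterisation =====

theorem B0_fold (ids : List String) :
    ∀ K : List String,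
    ids.foldl (fun (d : PySem.Dict String Bool) iid => d.insert iid false)
        (pvD K (fun _ => false))
      = pvD (PySem.Set.update K ids) (fun _ => false) := by
  induction ids with
  | nil => intro K; simp [PySem.Set.update]
  | cons id rest ih =>
    intro K
    rw [List.foldl_cons]
    rw [show PySem.Set.update K (id :: rest) = PySem.Set.update (PySem.Set.add K id) rest by
      simp [PySem.Set.update]]
    rw [← ih (PySem.Set.add K id)]
    congr 1
    exact insert_pvD_val (fun _ => false) id

theorem pvFirst_single_none {line k : String}
    (h1 : PySem.Str.isIn "1.0" line = false) (h0 : PySem.Str.isIn "0.0" line = false) :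
    pvFirst k [line] = none := by
  simp only [pvFirst, h1, h0, Bool.and_false, Bool.false_eq_true, if_false]

theorem B_inner (line : String) (has1 : Bool) (K : List String) :
    ∀ (P acc : List String) (f : String → Bool), (∀ k ∈ P, k ∈ K) →
    P.foldl (pvBResolveLine line has1) (pvD K f, acc)
      = (pvD K (fun k => if k ∈ P ∧ PySem.Str.isIn k line = true ∧ has1 = true then true else f k),
         acc ++ P.filter (fun k => !(PySem.Str.isIn k line))) := by
  intro P
  induction P with
  | nil =>
    intro acc f _
    rw [List.foldl_nil, List.filter_nil, List.append_nil, Prod.mk.injEq]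
    exact ⟨pvD_congr fun k _ => by simp, rfl⟩
  | cons p P' ih =>
    intro acc f hsub
    have hpK : p ∈ K := hsub p List.mem_cons_self
    rw [List.foldl_cons]
    by_cases hpl : PySem.Str.isIn p line = true
    · have hfiltp : (p :: P').filter (fun k => !(PySem.Str.isIn k line))
          = P'.filter (fun k => !(PySem.Str.isIn k line)) :=
        List.filter_cons_of_neg (by rw [hpl]; simp)
    -- p is resolved by this line
      by_cases h1 : has1 = true
      · have hstep : pvBResolveLine line has1 (pvD K f, acc)  p
            = ((pvD K f).insert p true, acc) := by
          unfold pvBResolveLine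
          rw [if_pos hpl, if_pos h1]
        rw [hstep, insert_pvD_mem f true hpK,
          ih acc _ (fun k hk => hsub k (List.mem_cons_of_mem _ hk)), Prod.mk.injEq, hfiltp]
        refine ⟨pvD_congr fun k _ => ?_, rfl⟩
        by_cases hk' : k ∈ P' ∧ PySem.Str.isIn k line = true ∧ has1 = true
        · rw [if_pos hk', if_pos ⟨List.mem_cons_of_mem _ hk'.1, hk'.2⟩]
        · rw [if_neg hk']
          by_cases hkp : k = p
          · rw [if_pos hkp, if_pos (by subst hkp; exact ⟨List.mem_cons_self, hpl, h1⟩)]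
          · have hneg : ¬(k ∈ p :: P' ∧ PySem.Str.isIn k line = true ∧ has1 = true) := by
              intro h
              rcases List.mem_cons.mp h.1 with he | hm
              · exact hkp he
              · exact hk' ⟨hm, h.2⟩
            rw [if_neg hkp, if_neg hneg]
      · have h1' : has1 = false := by simpa using h1
        have hstep : pvBResolveLine line has1 (pvD K f, acc) p = (pvD K f, acc) := by
          unfold pvBResolveLine
          rw [if_pos hpl, if_neg (by rw [h1']; simp)]
        rw [hstep, ih acc f (fun k hk => hsub k (List.mem_cons_of_mem _ hk)), Prod.mk.injEq, hfiltp]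
        refine ⟨pvD_congr fun k _ => ?_, rfl⟩
        rw [if_neg (by intro h; exact h1 h.2.2), if_neg (by intro h; exact h1 h.2.2)]
    · have hpl' : PySem.Str.isIn p line = false := by simpa using hpl
      have hfiltp : (p :: P').filter (fun k => !(PySem.Str.isIn k line))
          = p :: P'.filter (fun k => !(PySem.Str.isIn k line)) :=
        List.filter_cons_of_pos (by rw [hpl']; simp)
      have hstep : pvBResolveLine line has1 (pvD K f, acc) p = (pvD K f, acc ++ [p]) := by
        unfold pvBResolveLine
        rw [if_neg (by rw [hpl']; simp)]
      rw [hstep, ih (acc ++ [p]) f (fun k hk => hsub k (List.mem_cons_of_mem _ hk)),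
        Prod.mk.injEq, hfiltp]
      refine ⟨pvD_congr fun k _ => ?_, by rw [List.append_assoc, List.singleton_append]⟩
      by_cases hk' : k ∈ P' ∧ PySem.Str.isIn k line = true ∧ has1 = true
      · rw [if_pos hk', if_pos ⟨List.mem_cons_of_mem _ hk'.1, hk'.2⟩]
      · have hneg : ¬(k ∈ p :: P' ∧ PySem.Str.isIn k line = true ∧ has1 = true) := by
          intro h
          rcases List.mem_cons.mp h.1 with he | hm
          · exact hpl (he ▸ h.2.1)
          · exact hk' ⟨hm, h.2⟩
        rw [if_neg hk', if_neg hneg]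

theorem B_step (K pre : List String) (line : String) :
    pvBLine (pvD K (pvValP pre), K.filter (fun k => (pvFirst k pre).isNone)) line
      = (pvD K (pvValP (pre ++ [line])),
         K.filter (fun k => (pvFirst k (pre ++ [line])).isNone)) := by
  by_cases hP : (K.filter (fun k => (pvFirst k pre).isNone)).isEmpty = true
  · -- pending is empty: the loop has broken, nothing changes any more
    have hnil : K.filter (fun k => (pvFirst k pre).isNone) = [] := by
      simpa using hP
    have hall : ∀ k ∈ K, (pvFirst k pre).isNone = false := by
      intro k hk
      by_contra h
      have : k ∈ K.filter (fun k => (pvFirst k pre).isNone) :=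
        List.mem_filter.mpr ⟨hk, by simpa using h⟩
      simp [hnil] at this
    have hsame : ∀ k ∈ K, pvFirst k (pre ++ [line]) = pvFirst k pre := by
      intro k hk
      rw [pvFirst_append]
      cases hfst : pvFirst k pre with
      | none => exact absurd (hall k hk) (by rw [hfst]; simp)
      | some b => simp
    unfold pvBLine
    rw [if_pos hP, Prod.mk.injEq]
    constructor
    · exact pvD_congr fun k hk => by simp [pvValP, hsame k hk]
    · rw [hnil, List.filter_congr (fun k hk => by rw [hsame k hk]), hnil]
  · unfold pvBLine
    rw [if_neg hP]
    by_cases hsc : (!(PySem.Str.isIn "1.0" line || PySem.Str.isIn "0.0" line)) = true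
    · -- no score on this line: nothing resolves
      have h1 : PySem.Str.isIn "1.0" line = false := by
        revert hsc; cases PySem.Str.isIn "1.0" line <;> simp
      have h0 : PySem.Str.isIn "0.0" line = false := by
        revert hsc; cases PySem.Str.isIn "0.0" line <;> simp
      rw [if_pos hsc, Prod.mk.injEq]
      have hsame : ∀ k, pvFirst k (pre ++ [line]) = pvFirst k pre := by
        intro k
        rw [pvFirst_append, pvFirst_single_none h1 h0, Option.or_none]
      constructor
      · exact pvD_congr fun k _ => by simp [pvValP, hsame k]
      · exact List.filter_congr fun k _ => by rw [hsame k]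
    · -- the line carries a score: every pending id on it resolves now
      have hor : PySem.Str.isIn "1.0" line = true ∨ PySem.Str.isIn "0.0" line = true := by
        revert hsc; cases h1 : PySem.Str.isIn "1.0" line <;> cases h0 : PySem.Str.isIn "0.0" line <;> simp
      rw [if_neg hsc]
      rw [B_inner line (PySem.Str.isIn "1.0" line) K _ [] (pvValP pre)
        (fun k hk => (List.mem_filter.mp hk).1), Prod.mk.injEq]
      have hmemP : ∀ k, k ∈ K.filter (fun k => (pvFirst k pre).isNone)
          ↔ (k ∈ K ∧ pvFirst k pre = none) := by
        intro k
        rw [List.mem_filter]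
        simp [Option.isNone_iff_eq_none]
      have hsingle : ∀ k, pvFirst k [line] =
          (if PySem.Str.isIn k line = true then
            (if PySem.Str.isIn "1.0" line = true then some true else some false) else none) := by
        intro k
        by_cases hkl : PySem.Str.isIn k line = true
        · by_cases h1 : PySem.Str.isIn "1.0" line = true
          · unfold pvFirst
            rw [if_pos hkl, if_pos h1, hkl, h1]
            rfl
          · have h1' : PySem.Str.isIn "1.0" line = false := by simpa using h1
            have h0 : PySem.Str.isIn "0.0" line = true := hor.resolve_left h1
            unfold pvFirst
            rw [hkl, h1', h0]
            simp
        · have hkl' : PySem.Str.isIn k line = false := by simpa using hkl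
          unfold pvFirst
          rw [hkl']
          simp [pvFirst]
      constructor
      · apply pvD_congr
        intro k hk
        have hv : pvValP (pre ++ [line]) k = ((pvFirst k pre).or (pvFirst k [line])).getD false := by
          rw [pvValP, pvFirst_append]
        cases hfst : pvFirst k pre with
        | some b =>
          have hnp : k ∉ K.filter (fun k => (pvFirst k pre).isNone) := by
            rw [hmemP]; simp [hfst]
          rw [if_neg (by intro h; exact hnp h.1), hv, hfst, Option.some_or, pvValP, hfst]
        | none =>
          have hp : k ∈ K.filter (fun k => (pvFirst k pre).isNone) := by
            rw [hmemP]; exact ⟨hk, hfst⟩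
          rw [hv, hfst, Option.none_or, hsingle k]
          by_cases hkl : PySem.Str.isIn k line = true
          · by_cases h1 : PySem.Str.isIn "1.0" line = true
            · rw [if_pos ⟨hp, hkl, h1⟩, if_pos hkl, if_pos h1]
              rfl
            · rw [if_neg (by intro h; exact h1 h.2.2), if_pos hkl, if_neg h1, pvValP, hfst]
              rfl
          · rw [if_neg (by intro h; exact hkl h.2.1), if_neg hkl, pvValP, hfst]
      · rw [List.nil_append, List.filter_filter]
        apply List.filter_congr
        intro k _
        rw [pvFirst_append]
        cases hfst : pvFirst k pre with
        | some b => simp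
        | none =>
          rw [Option.none_or, hsingle k]
          by_cases hkl : PySem.Str.isIn k line = true
          · by_cases h1 : PySem.Str.isIn "1.0" line = true
            · rw [if_pos hkl, if_pos h1, hkl]
              rfl
            · rw [if_pos hkl, if_neg h1, hkl]
              rfl
          · have hkl' : PySem.Str.isIn k line = false := by simpa using hkl
            rw [if_neg hkl, hkl']
            rfl

theorem B_fold (K : List String) :
    ∀ (suf pre : List String),
    suf.foldl pvBLine (pvD K (pvValP pre), K.filter (fun k => (pvFirst k pre).isNone))
      = (pvD K (pvValP (pre ++ suf)), K.filter (fun k => (pvFirst k (pre ++ suf)).isNone)) := by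
  intro suf
  induction suf with
  | nil => intro pre; simp
  | cons line rest ih =>
    intro pre
    rw [List.foldl_cons, B_step K pre line, ih (pre ++ [line])]
    simp [List.append_assoc]

-- ===== VERDICT (by name: the statement is the Claim_ definition above) =====
theorem parse_instruction_scores_py_spec : Claim_equal_parse_instruction_scores_py := by
  intro raw ids _
  unfold Spec_parse_instruction_scores_py
  unfold parse_instruction_scores_py parse_instruction_scores_py_alt
  simp only []
  set L := (PySem.Str.split? raw "\n").getD [] with hL
  set K := PySem.Set.ofList ids with hK
  have hA : ids.foldl (fun (scores : PySem.Dict String Bool) instruction_id =>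
      if PySem.Str.isIn instruction_id raw then
        let lines := L
        let scores1 := pvAScanLines scores instruction_id lines
        if scores1.contains instruction_id then scores1 else scores1.insert instruction_id false
      else scores.insert instruction_id false) PySem.Dict.empty
      = pvD K (pvVal raw L) := by
    have := A_fold raw ids []
    simpa [pvD, PySem.Set.update, PySem.Set.ofList, PySem.Set.empty, PySem.Dict.empty, hK, hL] using this
  have hB0 : ids.foldl (fun (d : PySem.Dict String Bool) iid => d.insert iid false) PySem.Dict.empty
      = pvD K (fun _ => false) := by
    have := B0_fold ids []
    simpa [pvD, PySem.Set.update, PySem.Set.ofList, PySem.Set.empty, PySem.Dict.empty, hK] using this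
  rw [hA, hB0, keys_pvD]
  have hinit1 : pvD K (fun _ => false) = pvD K (pvValP []) :=
    pvD_congr fun k _ => by simp [pvValP, pvFirst]
  have hinit2 : K = K.filter (fun k => (pvFirst k []).isNone) := by
    rw [List.filter_congr (fun k _ => by simp [pvFirst]; rfl)]
    simp
  rw [hinit1]
  rw [show ((pvD K (pvValP []), (K : List String)))
      = (pvD K (pvValP []), K.filter (fun k => (pvFirst k []).isNone)) from by
    rw [← hinit2]]
  rw [B_fold K L []]
  simp only [List.nil_append]
  exact congrArg PySem.Dict.items (pvD_congr fun k _ => pvVal_eq_pvValP raw k)
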